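-- pv_equiv track=rewrite | github.com/rygon1/fe8r-guide | app/blueprints/utils.py | make_valid_class_name
-- ===== SOURCE A (Python) =====
-- def make_valid_class_name(s) -> str:
--     # Remove invalid characters and replace underscores with dashes and spaces with underscores
--     cleaned_s = (
--         "".join(c for c in s if c.isalnum() or c in (" ", "_", "-"))
--         .replace("_", "-")
--         .replace(" ", "_")
--     )
--     # Ensure it starts with a letter or underscore
--     if cleaned_s and not cleaned_s[0].isalpha():
--         cleaned_s = "xx" + cleaned_s
--     # Convert to PascalCase (optional, but common for Python class names)
--     parts = cleaned_s.split("_")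
--     pascal_case_name = "-".join(part.capitalize() for part in parts)
--     return pascal_case_name
-- ===== SOURCE B (Python) =====
-- def make_valid_class_name(s) -> str:
--     # Single char-level pass replaces the split/capitalize/join: a 'segment start' state machine.
--     mapping = {"_": "-", " ": "_"}
--     cleaned = []
--     for c in s:
--         if c.isalnum() or c in " _-":
--             cleaned.append(mapping.get(c, c))
--     if cleaned and not cleaned[0].isalpha():
--         cleaned[:0] = ["x", "x"]
--     out = []
--     start = True
--     for c in cleaned:
--         if c == "_":
--             out.append("-")
--             start = True
--         elif start:
--             out.append(c.upper())
--             start = False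
--         else:
--             out.append(c.lower())
--     return "".join(out)
-- ===== Notes on version B (the rewrite author's own statement) =====
-- stated objective: alternative
-- what changed: A's three cleaning passes (filter plus two str.replace calls) are fused into one filter-map pass, and the word-level split/capitalize/join stage is replaced by a single character-level state machine carrying a segment-start flag.
import Mathlib
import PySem

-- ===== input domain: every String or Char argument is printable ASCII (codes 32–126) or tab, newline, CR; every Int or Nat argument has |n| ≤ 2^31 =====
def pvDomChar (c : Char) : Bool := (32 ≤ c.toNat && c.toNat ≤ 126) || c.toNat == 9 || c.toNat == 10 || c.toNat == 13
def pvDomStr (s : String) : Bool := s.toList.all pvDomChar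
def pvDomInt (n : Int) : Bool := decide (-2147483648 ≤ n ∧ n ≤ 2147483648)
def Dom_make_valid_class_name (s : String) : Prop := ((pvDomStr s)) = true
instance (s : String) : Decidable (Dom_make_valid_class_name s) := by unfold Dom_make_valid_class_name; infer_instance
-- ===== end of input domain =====

-- B replaces A's word-level split/capitalize/join with a single character-level
-- state-machine pass, and fuses A's filter + two replace passes into one loop.

-- ===== PORT A =====
-- str.capitalize (exact on ASCII): first char upper-cased, the rest lower-cased
def pvCapitalize (cs : List Char) : List Char :=
  match cs with
  | [] => []
  | c :: rest => PySem.Chars.upperChar c :: rest.map PySem.Chars.lowerChar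

def make_valid_class_name (s : String) : String :=
  let cleaned0 := s.toList.filter (fun c => PySem.Chars.isalnum c || (c == ' ' || c == '_' || c == '-'))
  let cleaned1 := PySem.Chars.replace (PySem.Chars.replace cleaned0 ['_'] ['-']) [' '] ['_']
  let cleaned2 :=
    match cleaned1 with
    | [] => cleaned1
    | c :: _ => if PySem.Chars.isalpha c then cleaned1 else 'x' :: 'x' :: cleaned1
  String.ofList (PySem.Chars.join ['-'] ((PySem.Chars.splitOn cleaned2 ['_']).map pvCapitalize))

-- ===== PORT B =====
-- one cleaning step: keep a valid char, already translated (underscore→dash, space→underscore)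
def pvMapKeep (c : Char) : Option Char :=
  if PySem.Chars.isalnum c || (c == ' ' || c == '_' || c == '-') then
    some (if c == '_' then '-' else if c == ' ' then '_' else c)
  else none

-- the state machine: start=true at the beginning of a segment
def pvPascalGo : List Char → Bool → List Char
  | [], _ => []
  | c :: rest, start =>
    if c == '_' then '-' :: pvPascalGo rest true
    else if start then PySem.Chars.upperChar c :: pvPascalGo rest false
    else PySem.Chars.lowerChar c :: pvPascalGo rest false

def make_valid_class_name_alt (s : String) : String :=
  let cleaned := s.toList.filterMap pvMapKeep
  let cleaned2 :=
    match cleaned with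
    | [] => cleaned
    | c :: _ => if PySem.Chars.isalpha c then cleaned else 'x' :: 'x' :: cleaned
  String.ofList (pvPascalGo cleaned2 true)

-- ===== PRECONDITION & SPEC =====
def Spec_make_valid_class_name (s : String) (out : String) : Prop := out = make_valid_class_name_alt s
instance (s : String) (out : String) : Decidable (Spec_make_valid_class_name s out) := by unfold Spec_make_valid_class_name; infer_instance

-- ===== CLAIM (what is proved, stated in full; the proofs are below) =====
def Claim_equal_make_valid_class_name : Prop := ∀ (s : String), Dom_make_valid_class_name s → Spec_make_valid_class_name s (make_valid_class_name s)

-- ===== LEMMAS AND PROOFS =====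

-- a reference split-on-one-char function
def pvSplit1 (a : Char) : List Char → List (List Char)
  | [] => [[]]
  | c :: t =>
    if c == a then [] :: pvSplit1 a t
    else
      match pvSplit1 a t with
      | [] => [[c]]
      | h :: r => (c :: h) :: r
theorem pv_replace_go_single (a b : Char) :
    ∀ (fuel : Nat) (l acc : List Char), l.length ≤ fuel →
      PySem.Chars.replace.go [a] [b] fuel l acc
        = acc.reverse ++ l.map (fun c => if c == a then b else c) := by
  intro fuel
  induction fuel with
  | zero => intro l acc h; simp at h; subst h; simp [PySem.Chars.replace.go]
  | succ n ih =>
    intro l acc h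
    cases l with
    | nil => simp [PySem.Chars.replace.go]
    | cons c t =>
      rw [PySem.Chars.replace.go]
      by_cases hc : c = a
      · subst hc
        simp only [List.isPrefixOf, BEq.rfl, Bool.and_eq_true]
        simp [ih t _ (by simpa using Nat.le_of_succ_le_succ h)]
      · have : List.isPrefixOf [a] (c :: t) = false := by
          simp [List.isPrefixOf]; exact fun hh => absurd hh.symm hc
        rw [this]
        simp only [Bool.false_eq_true, if_false]
        rw [ih t _ (by simpa using Nat.le_of_succ_le_succ h)]
        simp [hc]

theorem pv_replace_single (a b : Char) (l : List Char) :
    PySem.Chars.replace l [a] [b] = l.map (fun c => if c == a then b else c) := by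
  rw [PySem.Chars.replace]
  simp [pv_replace_go_single a b l.length l [] le_rfl]

theorem pvSplit1_ne_nil (a : Char) (l : List Char) : pvSplit1 a l ≠ [] := by
  cases l with
  | nil => simp [pvSplit1]
  | cons c t =>
    simp only [pvSplit1]
    split <;> simp
    split <;> simp

theorem pv_splitOn_go_single (a : Char) :
    ∀ (fuel : Nat) (l cur : List Char) (acc : List (List Char)), l.length ≤ fuel →
      PySem.Chars.splitOn.go [a] fuel l cur acc
        = acc.reverse ++ (match pvSplit1 a l with
                          | [] => [cur.reverse]
                          | h :: r => (cur.reverse ++ h) :: r) := by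
  intro fuel
  induction fuel with
  | zero =>
    intro l cur acc h; simp at h; subst h
    simp [PySem.Chars.splitOn.go, pvSplit1]
  | succ n ih =>
    intro l cur acc h
    cases l with
    | nil => simp [PySem.Chars.splitOn.go, pvSplit1]
    | cons c t =>
      rw [PySem.Chars.splitOn.go]
      by_cases hc : c = a
      · have hpre : List.isPrefixOf [a] (c :: t) = true := by
          simp [List.isPrefixOf, hc]
        simp only [hpre, if_pos]
        simp only [List.length_cons, List.length_nil, List.drop_succ_cons, List.drop_zero]
        rw [ih t [] _ (by simpa using Nat.le_of_succ_le_succ h)]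
        have hcb : (c == a) = true := by simpa using hc
        simp only [pvSplit1, hcb, if_pos]
        cases hh : pvSplit1 a t with
        | nil => exact absurd hh (pvSplit1_ne_nil a t)
        | cons x xs => simp
      · have hpre : List.isPrefixOf [a] (c :: t) = false := by
          simp [List.isPrefixOf]; exact fun hh => absurd hh.symm hc
        rw [hpre]
        simp only [Bool.false_eq_true, if_false]
        rw [ih t (c :: cur) acc (by simpa using Nat.le_of_succ_le_succ h)]
        have hcb : (c == a) = false := by simpa using hc
        simp only [pvSplit1, hcb, Bool.false_eq_true, if_false]
        cases hh : pvSplit1 a t with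
        | nil => exact absurd hh (pvSplit1_ne_nil a t)
        | cons x xs => simp

theorem pv_splitOn_single (a : Char) (l : List Char) :
    PySem.Chars.splitOn l [a] = pvSplit1 a l := by
  rw [PySem.Chars.splitOn]
  rw [pv_splitOn_go_single a (l.length + 1) l [] [] (by omega)]
  cases hh : pvSplit1 a l with
  | nil => exact absurd hh (pvSplit1_ne_nil a l)
  | cons x xs => simp

theorem pv_join_cons (x : List Char) (xs : List (List Char)) :
    PySem.Chars.join ['-'] (x :: xs) = x ++ xs.flatMap (fun y => '-' :: y) := by
  induction xs generalizing x with
  | nil => simp [PySem.Chars.join, List.intercalate]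
  | cons y ys ih =>
    simp only [PySem.Chars.join, List.intercalate] at *
    simp [List.intersperse, List.flatten] at *
    simp [ih y]

theorem pv_clean_eq (l : List Char) :
    PySem.Chars.replace (PySem.Chars.replace
        (l.filter (fun c => PySem.Chars.isalnum c || (c == ' ' || c == '_' || c == '-'))) ['_'] ['-']) [' '] ['_']
      = l.filterMap pvMapKeep := by
  rw [pv_replace_single, pv_replace_single, List.map_map]
  induction l with
  | nil => simp
  | cons c t ih =>
    rw [List.filter_cons, List.filterMap_cons]
    by_cases hk : (PySem.Chars.isalnum c || (c == ' ' || c == '_' || c == '-')) = true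
    · have hm : pvMapKeep c = some (if c == '_' then '-' else if c == ' ' then '_' else c) := by
        rw [pvMapKeep, if_pos hk]
      rw [if_pos hk, List.map_cons, ih, hm]
      have hv : ((fun c => if c == ' ' then '_' else c) ∘ fun c => if c == '_' then '-' else c) c
          = (if c == '_' then '-' else if c == ' ' then '_' else c) := by
        by_cases h1 : c = '_'
        · subst h1; simp
        · simp [h1]
      rw [hv]
    · have hm : pvMapKeep c = none := by
        rw [pvMapKeep, if_neg hk]
      rw [if_neg hk, hm, ih]

theorem pv_pascal_eq (cs : List Char) :
    (match pvSplit1 '_' cs with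
     | [] => []
     | h :: r => pvCapitalize h ++ r.flatMap (fun y => '-' :: pvCapitalize y)) = pvPascalGo cs true
    ∧
    (match pvSplit1 '_' cs with
     | [] => []
     | h :: r => h.map PySem.Chars.lowerChar ++ r.flatMap (fun y => '-' :: pvCapitalize y)) = pvPascalGo cs false := by
  induction cs with
  | nil => simp [pvSplit1, pvPascalGo, pvCapitalize]
  | cons c t ih =>
    obtain ⟨ihT, ihF⟩ := ih
    by_cases hc : c = '_'
    · subst hc
      simp only [pvSplit1, BEq.rfl, if_pos, pvPascalGo]
      cases hh : pvSplit1 '_' t with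
      | nil => exact absurd hh (pvSplit1_ne_nil _ t)
      | cons h r =>
        rw [hh] at ihT
        constructor <;>
        · rw [← ihT]
          simp [pvCapitalize]
    · have hcb : (c == '_') = false := by simpa using hc
      simp only [pvSplit1, hcb, Bool.false_eq_true, if_false, pvPascalGo]
      cases hh : pvSplit1 '_' t with
      | nil => exact absurd hh (pvSplit1_ne_nil _ t)
      | cons h r =>
        rw [hh] at ihF
        constructor
        · rw [← ihF]; simp [pvCapitalize]
        · rw [← ihF]; simp [pvCapitalize]

theorem pv_main (cs : List Char) :
    PySem.Chars.join ['-'] ((PySem.Chars.splitOn cs ['_']).map pvCapitalize) = pvPascalGo cs true := by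
  rw [pv_splitOn_single]
  cases hh : pvSplit1 '_' cs with
  | nil => exact absurd hh (pvSplit1_ne_nil _ cs)
  | cons h r =>
    rw [List.map_cons, pv_join_cons]
    have hP := (pv_pascal_eq cs).1
    rw [hh] at hP
    rw [← hP]
    simp [List.flatMap_map]

-- ===== VERDICT (by name: the statement is the Claim_ definition above) =====
theorem make_valid_class_name_spec : Claim_equal_make_valid_class_name := by
  intro s _
  unfold Spec_make_valid_class_name make_valid_class_name make_valid_class_name_alt
  simp only [pv_clean_eq, pv_main]
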